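-- pv_equiv track=rewrite | github.com/meghnak2001/python | countflippedbits.py | count
-- ===== SOURCE A (Python) =====
-- def count(a,b):
--     c=0
--     while a>0 and b>0:
--         d=a%2
--         e=b%2 # or d=n&1
--         if d^e==1:
--             c+=1
--         a=a//2
--         b=b//2 # or n=n>>1
--     return c
-- ===== SOURCE B (Python) =====
-- def count(a, b):
--     if a <= 0 or b <= 0:
--         return 0
--     k = min(a.bit_length(), b.bit_length())
--     return bin((a ^ b) % (1 << k)).count('1')
-- ===== Notes on version B (the rewrite author's own statement) =====
-- stated objective: idiomatic
-- what changed: Replaces the per-bit while loop by a closed-form computation: k = min of the bit lengths, then one XOR, one mask to the low k bits, and one popcount (bin(...).count('1')).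
import Mathlib
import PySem

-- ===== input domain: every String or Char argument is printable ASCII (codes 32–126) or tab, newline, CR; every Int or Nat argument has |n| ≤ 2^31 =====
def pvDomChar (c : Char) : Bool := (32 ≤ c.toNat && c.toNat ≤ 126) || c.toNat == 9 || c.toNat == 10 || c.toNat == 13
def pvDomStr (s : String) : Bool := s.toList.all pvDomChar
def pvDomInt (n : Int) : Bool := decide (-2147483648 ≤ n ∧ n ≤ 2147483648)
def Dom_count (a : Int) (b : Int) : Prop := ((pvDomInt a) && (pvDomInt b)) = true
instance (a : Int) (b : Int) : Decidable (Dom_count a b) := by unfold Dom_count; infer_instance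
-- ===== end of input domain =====

-- B replaces A's per-bit while loop by one XOR, one mask to the common low-bit region and
-- one popcount (idiomatic closed form; not claimed faster).

-- ===== PORT A =====
-- the while loop of A, with accumulator c
def countLoop (a b c : Int) : Int :=
  if 0 < a ∧ 0 < b then
    countLoop (PySem.Int.floordiv a 2) (PySem.Int.floordiv b 2)
      (if PySem.Int.bxor (PySem.Int.mod a 2) (PySem.Int.mod b 2) = 1 then c + 1 else c)
  else c
termination_by a.toNat
decreasing_by
  rename_i h
  have : PySem.Int.floordiv a 2 = a / 2 := PySem.Int.floordiv_eq_ediv_of_pos (by omega)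
  rw [this]; omega

def count (a : Int) (b : Int) : Int := countLoop a b 0

-- ===== PORT B =====
def count_alt (a : Int) (b : Int) : Int :=
  if a ≤ 0 ∨ b ≤ 0 then 0
  else
    let k := min (PySem.Int.bitLength a) (PySem.Int.bitLength b)
    (PySem.Int.bitCount (PySem.Int.mod (PySem.Int.bxor a b) ((1 : Int) <<< k)) : Int)

-- ===== PRECONDITION & SPEC =====
def Spec_count (a : Int) (b : Int) (out : Int) : Prop := out = count_alt a b
instance (a : Int) (b : Int) (out : Int) : Decidable (Spec_count a b out) := by unfold Spec_count; infer_instance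

-- ===== CLAIM (what is proved, stated in full; the proofs are below) =====
def Claim_equal_count : Prop := ∀ (a : Int) (b : Int), Dom_count a b → Spec_count a b (count a b)

-- ===== LEMMAS AND PROOFS =====

-- common reference function on Nat: the count of differing low bits
def cntN (m n : Nat) : Nat :=
  if m = 0 ∨ n = 0 then 0
  else (if (m % 2) ^^^ (n % 2) = 1 then 1 else 0) + cntN (m / 2) (n / 2)
termination_by m
decreasing_by omega

-- closed form of B's popcount expression, over Nat
def gN (m n : Nat) : Nat :=
  PySem.Int.bitCount (((m ^^^ n) % 2 ^ (min (PySem.Int.bitLength (m : Int)) (PySem.Int.bitLength (n : Int))) : Nat) : Int)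

theorem xor_bit_le_one (m n : Nat) : (m % 2) ^^^ (n % 2) ≤ 1 := by
  rcases Nat.mod_two_eq_zero_or_one m with hm | hm <;>
    rcases Nat.mod_two_eq_zero_or_one n with hn | hn <;> rw [hm, hn] <;> decide

theorem xor_mod_two (m n : Nat) : (m ^^^ n) % 2 = (m % 2) ^^^ (n % 2) := by
  rw [Nat.xor_mod_two_eq]
  rcases Nat.mod_two_eq_zero_or_one m with hm | hm <;>
    rcases Nat.mod_two_eq_zero_or_one n with hn | hn <;>
      rw [Nat.add_mod, hm, hn] <;> decide

theorem bitCount_step (e y : Nat) (he : e ≤ 1) :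
    PySem.Int.bitCount ((e + 2 * y : Nat) : Int) = e + PySem.Int.bitCount ((y : Nat) : Int) := by
  by_cases hz : e + 2 * y = 0
  · have he0 : e = 0 := by omega
    have hy0 : y = 0 := by omega
    subst he0; subst hy0; decide
  · have h := PySem.Int.bitCount_natCast (m := e + 2 * y) (by omega)
    rw [h]
    have h1 : (e + 2 * y) % 2 = e := by omega
    have h2 : (e + 2 * y) / 2 = y := by omega
    rw [h1, h2]

theorem bitLength_zero_nat : PySem.Int.bitLength ((0 : Nat) : Int) = 0 := by decide

theorem gN_eq_cntN (m : Nat) : ∀ n : Nat, gN m n = cntN m n := by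
  induction m using Nat.strong_induction_on with
  | _ m ih =>
    intro n
    by_cases hm : m = 0
    · subst hm
      simp only [gN, bitLength_zero_nat, Nat.zero_min, pow_zero, Nat.mod_one]
      rw [cntN]; simp
    · by_cases hn : n = 0
      · subst hn
        simp only [gN, bitLength_zero_nat, Nat.min_zero, pow_zero, Nat.mod_one]
        rw [cntN]; simp
      · -- both positive
        have hbm := PySem.Int.bitLength_natCast (m := m) (by omega)
        have hbn := PySem.Int.bitLength_natCast (m := n) (by omega)
        have hmin : min (PySem.Int.bitLength (m : Int)) (PySem.Int.bitLength (n : Int))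
            = min (PySem.Int.bitLength ((m / 2 : Nat) : Int)) (PySem.Int.bitLength ((n / 2 : Nat) : Int)) + 1 := by
          rw [hbm, hbn]; omega
        set k := min (PySem.Int.bitLength ((m / 2 : Nat) : Int)) (PySem.Int.bitLength ((n / 2 : Nat) : Int)) with hk
        have hmask : (m ^^^ n) % 2 ^ (k + 1)
            = ((m % 2) ^^^ (n % 2)) + 2 * ((m / 2 ^^^ n / 2) % 2 ^ k) := by
          have : (2 : Nat) ^ (k + 1) = 2 * 2 ^ k := by ring
          rw [this, Nat.mod_mul, xor_mod_two, Nat.xor_div_two]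
        have hgoal : gN m n = ((m % 2) ^^^ (n % 2)) + gN (m / 2) (n / 2) := by
          unfold gN
          rw [hmin, ← hk, hmask, bitCount_step _ _ (xor_bit_le_one m n)]
        rw [hgoal, ih (m / 2) (by omega) (n / 2)]
        have hc : cntN m n = (if (m % 2) ^^^ (n % 2) = 1 then 1 else 0) + cntN (m / 2) (n / 2) := by
          rw [cntN]; rw [if_neg (by omega)]
        rw [hc]
        rcases Nat.eq_or_lt_of_le (xor_bit_le_one m n) with h1 | h1
        · rw [← h1]; simp
        · have h0 : (m % 2) ^^^ (n % 2) = 0 := by omega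
          rw [h0]; simp

theorem floordiv_two_natCast (m : Nat) :
    PySem.Int.floordiv (m : Int) 2 = ((m / 2 : Nat) : Int) := by
  exact_mod_cast PySem.Int.floordiv_natCast m 2

theorem mod_two_natCast (m : Nat) :
    PySem.Int.mod (m : Int) 2 = ((m % 2 : Nat) : Int) := by
  exact_mod_cast PySem.Int.mod_natCast m 2

theorem loopN (m : Nat) : ∀ (n : Nat) (c : Int),
    countLoop (m : Int) (n : Int) c = c + (cntN m n : Int) := by
  induction m using Nat.strong_induction_on with
  | _ m ih =>
    intro n c
    by_cases h : 0 < m ∧ 0 < n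
    · rw [countLoop]
      have hg : (0 : Int) < m ∧ (0 : Int) < n := by
        constructor <;> exact_mod_cast (by omega : (0:Nat) < _)
      rw [if_pos hg, floordiv_two_natCast, floordiv_two_natCast,
        mod_two_natCast, mod_two_natCast, PySem.Int.bxor_natCast,
        ih (m / 2) (by omega) (n / 2)]
      have hc : cntN m n = (if (m % 2) ^^^ (n % 2) = 1 then 1 else 0) + cntN (m / 2) (n / 2) := by
        rw [cntN]; rw [if_neg (by omega)]
      rw [hc]
      by_cases hx : (m % 2) ^^^ (n % 2) = 1
      · rw [if_pos (show ((((m % 2) ^^^ (n % 2) : Nat)) : Int) = 1 by exact_mod_cast hx), if_pos hx]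
        push_cast; ring
      · rw [if_neg (show ¬ ((((m % 2) ^^^ (n % 2) : Nat)) : Int) = 1 by exact_mod_cast hx), if_neg hx]
        push_cast; ring
    · rw [countLoop]
      have hg : ¬ ((0 : Int) < m ∧ (0 : Int) < n) := by
        intro ⟨h1, h2⟩; exact h ⟨by exact_mod_cast h1, by exact_mod_cast h2⟩
      rw [if_neg hg, cntN, if_pos (by omega)]
      simp

theorem altN (m n : Nat) (hm : 0 < m) (hn : 0 < n) :
    count_alt (m : Int) (n : Int) = (gN m n : Int) := by
  have hguard : ¬ ((m : Int) ≤ 0 ∨ (n : Int) ≤ 0) := by omega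
  simp only [count_alt, gN, if_neg hguard]
  rw [PySem.Int.bxor_natCast, Int.shiftLeft_eq, one_mul]
  rw [show ((2 : Int) ^ (min (PySem.Int.bitLength (m : Int)) (PySem.Int.bitLength (n : Int))))
      = (((2 ^ (min (PySem.Int.bitLength (m : Int)) (PySem.Int.bitLength (n : Int))) : Nat)) : Int)
    by push_cast; ring]
  rw [PySem.Int.mod_natCast]

-- ===== VERDICT (by name: the statement is the Claim_ definition above) =====
theorem count_spec : Claim_equal_count := by
  unfold Claim_equal_count
  intro a b _
  unfold Spec_count count
  by_cases h : 0 < a ∧ 0 < b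
  · obtain ⟨ha, hb⟩ := h
    have ha' : a = ((a.toNat : Nat) : Int) := by omega
    have hb' : b = ((b.toNat : Nat) : Int) := by omega
    rw [ha', hb', loopN, altN _ _ (by omega) (by omega), gN_eq_cntN]
    ring
  · rw [countLoop, if_neg h]
    unfold count_alt
    rw [if_pos (by omega)]
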